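-- pv_equiv track=rewrite | github.com/wiking10/JS2017 | 7.2.py | count_2sub_match
-- ===== SOURCE A (Python) =====
-- def count_2sub_match(a, b):
--     tmp = []
--     licznik = 0
--     for i in range(0, len(b)-1):
--         partB = b[i:i+2]
--         if partB not in tmp:
--             for j in range(0, len(a)-1):
--                 if a[j:j+2] == partB:
--                     licznik += 1
--         tmp.append(b[i:i + 2])
--     return licznik
-- ===== SOURCE B (Python) =====
-- def count_2sub_match(a, b):
--     grams = set(zip(b, b[1:]))
--     return sum(1 for p in zip(a, a[1:]) if p in grams)
-- ===== Notes on version B (the rewrite author's own statement) =====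
-- stated objective: faster
-- what changed: Replaces A's nested rescans (for each distinct 2-gram of b, a full scan of a, with a list membership test over previously seen grams) by character-pair bigrams: set(zip(b, b[1:])) built once, then a single counting pass over zip(a, a[1:]) testing set membership.
import Mathlib
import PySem

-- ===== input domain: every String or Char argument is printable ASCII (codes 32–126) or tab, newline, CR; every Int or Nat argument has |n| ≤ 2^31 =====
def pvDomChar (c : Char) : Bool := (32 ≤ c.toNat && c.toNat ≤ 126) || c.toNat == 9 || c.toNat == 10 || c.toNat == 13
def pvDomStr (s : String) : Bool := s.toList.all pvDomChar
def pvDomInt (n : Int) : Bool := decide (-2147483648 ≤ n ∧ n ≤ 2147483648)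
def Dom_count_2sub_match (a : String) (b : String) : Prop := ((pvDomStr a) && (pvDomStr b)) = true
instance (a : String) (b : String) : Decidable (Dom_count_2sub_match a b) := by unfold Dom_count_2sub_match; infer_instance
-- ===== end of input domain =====

-- B counts via character-pair bigrams: set(zip(b, b[1:])) once, then one counting
-- pass over zip(a, a[1:]) — no index ranges, no slices, no rescans; same value.

-- ===== PORT A =====
-- literal transliteration of A: fold over range(0, len(b)-1) carrying (tmp, licznik);
-- the inner 'for j' is a fold over range(0, len(a)-1).
def count_2sub_match (a : String) (b : String) : Int :=
  let al := a.toList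
  let bl := b.toList
  (((PySem.List.pyRange 0 (PySem.List.len bl - 1) 1).foldl
    (fun (st : List (List Char) × Int) i =>
      let partB := PySem.List.slice bl (some i) (some (i + 2))
      let licznik :=
        if partB ∈ st.1 then st.2
        else
          (PySem.List.pyRange 0 (PySem.List.len al - 1) 1).foldl
            (fun c j =>
              if PySem.List.slice al (some j) (some (j + 2)) = partB then c + 1 else c)
            st.2
      (st.1 ++ [PySem.List.slice bl (some i) (some (i + 2))], licznik))
    ([], 0)).2)

-- ===== PORT B =====
-- b[1:] / a[1:] is the tail (PySem.List.slice_from_one); zip is List.zip;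
-- sum(1 for p in … if p in grams) is the countP of the membership test, as an Int.
def count_2sub_match_alt (a : String) (b : String) : Int :=
  let grams : PySem.Set (Char × Char) := PySem.Set.ofList (b.toList.zip b.toList.tail)
  ((a.toList.zip a.toList.tail).countP (fun p => PySem.Set.contains grams p) : Int)

-- ===== PRECONDITION & SPEC =====
def Spec_count_2sub_match (a : String) (b : String) (out : Int) : Prop := out = count_2sub_match_alt a b
instance (a : String) (b : String) (out : Int) : Decidable (Spec_count_2sub_match a b out) := by unfold Spec_count_2sub_match; infer_instance

-- ===== CLAIM (what is proved, stated in full; the proofs are below) =====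
def Claim_equal_count_2sub_match : Prop := ∀ (a : String) (b : String), Dom_count_2sub_match a b → Spec_count_2sub_match a b (count_2sub_match a b)

-- ===== LEMMAS AND PROOFS =====

-- pointwise disjoint split of a countP
theorem pv_countP_split {G : Type} (l : List G) (p q r : G → Bool)
    (h : ∀ x, p x = (q x || r x) ∧ ¬(q x = true ∧ r x = true)) :
    l.countP p = l.countP q + l.countP r := by
  induction l with
  | nil => simp
  | cons x xs ih =>
    rcases h x with ⟨hx, hdis⟩
    simp only [List.countP_cons, ih, hx]
    cases hq : q x <;> cases hr : r x <;> simp [hq, hr] at hx hdis ⊢ <;> omega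

-- A's outer loop, viewed on the list of b-grams: starting from (tmp, c), the final
-- counter is c plus the number of a-grams that occur in ps but not in tmp.
theorem pv_A_outer (agrams : List (List Char)) :
    ∀ (ps tmp : List (List Char)) (c : Int),
      (ps.foldl
        (fun (st : List (List Char) × Int) p =>
          (st.1 ++ [p],
            if p ∈ st.1 then st.2
            else agrams.foldl (fun cc g => if g = p then cc + 1 else cc) st.2))
        (tmp, c)).2
      = c + (agrams.countP (fun g => decide (g ∈ ps ∧ g ∉ tmp)) : Int) := by
  intro ps
  induction ps with
  | nil => intro tmp c; simp
  | cons p ps ih =>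
    intro tmp c
    simp only [List.foldl_cons]
    rw [ih]
    by_cases hp : p ∈ tmp
    · simp only [hp, if_pos]
      have : agrams.countP (fun g => decide (g ∈ ps ∧ g ∉ tmp ++ [p]))
           = agrams.countP (fun g => decide (g ∈ p :: ps ∧ g ∉ tmp)) := by
        apply List.countP_congr
        intro x _
        by_cases hxp : x = p
        · subst hxp; simp [hp]
        · simp [hxp, List.mem_append]
      rw [this]
    · simp only [hp, if_neg, not_false_iff]
      rw [PySem.List.foldl_ite_add_one]
      have hsplit : agrams.countP (fun g => decide (g ∈ p :: ps ∧ g ∉ tmp))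
          = agrams.countP (fun g => decide (g = p))
            + agrams.countP (fun g => decide (g ∈ ps ∧ g ∉ tmp ++ [p])) := by
        apply pv_countP_split
        intro x
        by_cases hxp : x = p
        · subst hxp; simp [hp]
        · simp [hxp, List.mem_append]
      rw [hsplit]; push_cast; ring

-- the j ↦ l[j:j+2] slices over range(len(l)-1) ARE the bigrams zip l l.tail, as 2-lists
theorem pv_slices_eq_zip (l : List Char) :
    (PySem.List.pyRange 0 (PySem.List.len l - 1) 1).map
        (fun i => PySem.List.slice l (some i) (some (i + 2)))
      = (l.zip l.tail).map (fun p => [p.1, p.2]) := by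
  apply List.ext_getElem
  · simp only [List.length_map, PySem.List.length_pyRange_one, List.length_zip,
      List.length_tail, PySem.List.len]
    omega
  · intro k h1 h2
    have hk : k < l.length - 1 := by
      simpa [PySem.List.length_pyRange_one, PySem.List.len] using h1
    simp only [List.getElem_map, PySem.List.getElem_pyRange_one, zero_add,
      List.getElem_zip, List.getElem_tail]
    have h2' : (k : Int) + 2 = ((k + 2 : Nat) : Int) := by push_cast; ring
    rw [h2', PySem.List.slice_natCast]
    have h22 : k + 2 - k = 2 := by omega
    have hd1 : l.drop k = l[k]'(by omega) :: l.drop (k+1) := List.drop_eq_getElem_cons (by omega)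
    have hd2 : l.drop (k+1) = l[k+1]'(by omega) :: l.drop (k+2) := List.drop_eq_getElem_cons (by omega)
    rw [h22, hd1, hd2]
    rfl

-- injectivity of the bigram-to-2-list coding
theorem pv_pair_list_inj (x y : Char × Char) :
    ([x.1, x.2] = [y.1, y.2]) ↔ x = y := by
  constructor
  · intro h; simp at h; exact Prod.ext h.1 h.2
  · intro h; rw [h]

theorem count_2sub_match_eq (a b : String) :
    count_2sub_match a b = count_2sub_match_alt a b := by
  unfold count_2sub_match count_2sub_match_alt
  dsimp only
  generalize a.toList = al
  generalize b.toList = bl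
  set sliceB : Int → List Char := fun i => PySem.List.slice bl (some i) (some (i + 2)) with hsB
  set sliceA : Int → List Char := fun j => PySem.List.slice al (some j) (some (j + 2)) with hsA
  set Rb := PySem.List.pyRange 0 (PySem.List.len bl - 1) 1
  set Ra := PySem.List.pyRange 0 (PySem.List.len al - 1) 1
  set pa := al.zip al.tail with hpa
  set pb := bl.zip bl.tail with hpb
  set f : Char × Char → List Char := fun p => [p.1, p.2] with hf
  have hag : Ra.map sliceA = pa.map f := pv_slices_eq_zip al
  have hbg : Rb.map sliceB = pb.map f := pv_slices_eq_zip bl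
  -- A side: rewrite the fold over indices as a fold over the b-gram list, then close it
  have hA : ((Rb.foldl
      (fun (st : List (List Char) × Int) i =>
        (st.1 ++ [sliceB i],
          if sliceB i ∈ st.1 then st.2
          else Ra.foldl (fun c j => if sliceA j = sliceB i then c + 1 else c) st.2))
      ([], 0)).2)
      = (((pb.map f).foldl
          (fun (st : List (List Char) × Int) p =>
            (st.1 ++ [p],
              if p ∈ st.1 then st.2
              else (pa.map f).foldl (fun c g => if g = p then c + 1 else c) st.2))
          ([], 0)).2) := by
    rw [← hbg, ← hag]
    simp only [List.foldl_map]
  rw [hA, pv_A_outer (pa.map f) (pb.map f) [] 0]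
  simp only [List.not_mem_nil, not_false_iff, and_true, zero_add]
  -- both sides are now counts over bigrams; transfer along the injective coding f
  rw [List.countP_map]
  apply congrArg
  apply List.countP_congr
  intro x _
  have : (f x ∈ pb.map f) ↔ x ∈ pb := by
    constructor
    · intro h
      rcases List.mem_map.mp h with ⟨y, hy, hxy⟩
      rwa [← (pv_pair_list_inj y x).mp hxy]
    · exact fun h => List.mem_map_of_mem h
  simp [Function.comp, PySem.Set.mem_ofList, this]

-- ===== VERDICT (by name: the statement is the Claim_ definition above) =====
theorem count_2sub_match_spec : Claim_equal_count_2sub_match := by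
  intro a b _
  exact count_2sub_match_eq a b
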